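-- pv_equiv track=rewrite | github.com/cintiasilva-blc/ciencia_da_computacao | Primeiro Semestre/ FUNDAMENTOS DE ALGORITMOS/TRABALHO 2/Versão Final/MeuPrograma_Final.py | MaiorTamanho
-- ===== SOURCE A (Python) =====
-- def MaiorTamanho(lista: list[str]) -> int:
--     '''Recebe uma lista de nomes, encontra o maior tamanho,
--     Retorna o valor do maior tamanho.
--
--     Exemplos:
--     >>> MaiorTamanho(['Flamengo', 'Santos'])
--     8
--     >>> MaiorTamanho(['Cintia', 'Giovana', 'Nikolas', 'Ana-Paula'])
--     9
--     '''
--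
--     if len(lista) == 0:
--         return 0
--     elif len(lista) == 1:
--         return len(lista[0])
--     else:
--         rest = MaiorTamanho(lista[1:])
--
--         if len(lista[0]) > rest:
--             return len(lista[0])
--         else:
--             return rest
-- ===== SOURCE B (Python) =====
-- def MaiorTamanho(lista: list[str]) -> int:
--     maior = 0
--     for nome in lista:
--         if len(nome) > maior:
--             maior = len(nome)
--     return maior
-- ===== Notes on version B (the rewrite author's own statement) =====
-- stated objective: faster
-- what changed: Replaces the slice-based tail recursion (which copies lista[1:] at every call, quadratic overall, and can hit the recursion limit) with a single iterative loop accumulating the maximum length.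
import Mathlib
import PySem

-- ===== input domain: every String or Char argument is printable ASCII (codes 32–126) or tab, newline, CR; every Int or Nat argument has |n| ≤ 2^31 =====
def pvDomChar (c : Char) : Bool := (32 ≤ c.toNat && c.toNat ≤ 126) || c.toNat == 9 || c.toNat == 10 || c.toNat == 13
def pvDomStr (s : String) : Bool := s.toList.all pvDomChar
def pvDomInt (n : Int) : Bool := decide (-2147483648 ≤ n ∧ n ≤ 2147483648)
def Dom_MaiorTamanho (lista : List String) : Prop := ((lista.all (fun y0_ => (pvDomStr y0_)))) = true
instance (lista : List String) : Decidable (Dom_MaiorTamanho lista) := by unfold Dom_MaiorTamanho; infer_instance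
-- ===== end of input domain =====

-- B replaces A's slice-based tail recursion with one iterative accumulator loop (simpler); return value only, no mutation.

-- ===== PORT A =====
-- literal transliteration of A's recursion: empty → 0, singleton → len, else compare head with recursive result on lista[1:]
def MaiorTamanho (lista : List String) : Int :=
  if lista.length = 0 then 0
  else if lista.length = 1 then (PySem.Str.len (lista[0]!))
  else
    let rest := MaiorTamanho (PySem.List.slice lista (some 1) none)
    if (PySem.Str.len (lista[0]!)) > rest then (PySem.Str.len (lista[0]!)) else rest
termination_by lista.length
decreasing_by
  simp [PySem.List.slice]
  omega

-- ===== PORT B =====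
-- literal transliteration of B's loop: maior = 0; for nome in lista: if len(nome) > maior: maior = len(nome)
def MaiorTamanho_alt (lista : List String) : Int :=
  lista.foldl (fun maior nome => if PySem.Str.len nome > maior then PySem.Str.len nome else maior) 0

-- ===== PRECONDITION & SPEC =====
def Spec_MaiorTamanho (lista : List String) (out : Int) : Prop := out = MaiorTamanho_alt lista
instance (lista : List String) (out : Int) : Decidable (Spec_MaiorTamanho lista out) := by unfold Spec_MaiorTamanho; infer_instance

-- ===== CLAIM (what is proved, stated in full; the proofs are below) =====
def Claim_equal_MaiorTamanho : Prop := ∀ (lista : List String), Dom_MaiorTamanho lista → Spec_MaiorTamanho lista (MaiorTamanho lista)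

-- ===== LEMMAS AND PROOFS =====

theorem pyStrLen_nonneg (s : String) : 0 ≤ PySem.Str.len s := by
  simp [PySem.Str.len]

-- foldl with a running max, starting from an accumulator max a b
theorem alt_foldl_max (lista : List String) (a b : Int) :
    lista.foldl (fun maior nome => if PySem.Str.len nome > maior then PySem.Str.len nome else maior) (max a b)
    = max a (lista.foldl (fun maior nome => if PySem.Str.len nome > maior then PySem.Str.len nome else maior) b) := by
  induction lista generalizing a b with
  | nil => simp
  | cons x xs ih =>
      simp only [List.foldl_cons]
      have : (if PySem.Str.len x > max a b then PySem.Str.len x else max a b)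
           = max a (if PySem.Str.len x > b then PySem.Str.len x else b) := by
        split <;> split <;> omega
      rw [this, ih]

theorem alt_cons (x : String) (xs : List String) :
    MaiorTamanho_alt (x :: xs) = max (PySem.Str.len x) (MaiorTamanho_alt xs) := by
  unfold MaiorTamanho_alt
  simp only [List.foldl_cons]
  have h0 : (if PySem.Str.len x > (0:Int) then PySem.Str.len x else 0) = max (PySem.Str.len x) 0 := by
    have := pyStrLen_nonneg x; omega
  rw [h0, alt_foldl_max]

theorem MaiorTamanho_eq_alt (lista : List String) : MaiorTamanho lista = MaiorTamanho_alt lista := by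
  induction lista with
  | nil => simp [MaiorTamanho, MaiorTamanho_alt]
  | cons x xs ih =>
      rw [MaiorTamanho]
      cases xs with
      | nil =>
          simp only [List.length_cons, List.length_nil]
          have := pyStrLen_nonneg x
          simp [MaiorTamanho_alt]
      | cons y ys =>
          have hlen : (x :: y :: ys).length ≠ 0 := by simp
          have hlen1 : (x :: y :: ys).length ≠ 1 := by simp
          rw [if_neg hlen, if_neg hlen1]
          have hslice : PySem.List.slice (x :: y :: ys) (some 1) none = y :: ys :=
            PySem.List.slice_from_one _
          rw [hslice, ih, alt_cons x (y :: ys)]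
          simp only [List.getElem!_cons_zero]
          have := pyStrLen_nonneg x
          split <;> omega

-- ===== VERDICT (by name: the statement is the Claim_ definition above) =====
theorem MaiorTamanho_spec : Claim_equal_MaiorTamanho := by
  intro lista _
  unfold Spec_MaiorTamanho
  exact (MaiorTamanho_eq_alt lista)
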